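-- pv_equiv track=rewrite | github.com/bertomaa/marcobertolino.dev | cv/generate_cv.py | generate_languages
-- ===== SOURCE A (Python) =====
-- def escape_latex(text: str) -> str:
--     """Escape special LaTeX characters."""
--     replacements = {
--         '&': r'\&',
--         '%': r'\%',
--         '$': r'\$',
--         '#': r'\#',
--         '_': r'\_',
--         '{': r'\{',
--         '}': r'\}',
--         '~': r'\textasciitilde{}',
--         '^': r'\^{}',
--     }
--     for char, replacement in replacements.items():
--         text = text.replace(char, replacement)
--     return text
--
-- def generate_languages(data: dict) -> str:
--     """Generate the languages section."""
--     languages = data.get("languages", [])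
--     if not languages:
--         return ""
--
--     lines = ["%", r"\section{Languages}", r"\explanationdetail{"]
--
--     lang_items = []
--     for lang in languages:
--         name = escape_latex(lang.get("language", ""))
--         fluency = escape_latex(lang.get("fluency", ""))
--         lang_items.append(f"    \\coloredbullet\\ %\n     \\textbf{{{name}}} - {fluency}")
--
--     lines.append("\n     \\hspace{2cm}\n".join(lang_items))
--     lines.append("     }")
--
--     return "\n".join(lines)
-- ===== SOURCE B (Python) =====
-- def _esc_char(c):
--     """Escape one character for LaTeX."""
--     if c == '~':
--         return '\\textasciitilde{}'
--     if c == '^':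
--         return '\\^{}'
--     if c in '&%$#_{}':
--         return '\\' + c
--     return c
--
-- def generate_languages(data):
--     languages = data.get("languages", [])
--     if not languages:
--         return ""
--     out = "%\n\\section{Languages}\n\\explanationdetail{\n"
--     first = True
--     for lang in languages:
--         if not first:
--             out += "\n     \\hspace{2cm}\n"
--         first = False
--         out += "    \\coloredbullet\\ %\n     \\textbf{"
--         for c in lang.get("language", ""):
--             out += _esc_char(c)
--         out += "} - "
--         for c in lang.get("fluency", ""):
--             out += _esc_char(c)
--     return out + "\n     }"
-- ===== Notes on version B (the rewrite author's own statement) =====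
-- stated objective: alternative
-- what changed: escape_latex's nine sequential whole-string .replace passes become a per-character if-chain escape, and the section is built in one forward pass into a single string accumulator (first-item flag deciding the separator) instead of collecting item strings into lists and joining them.
import Mathlib
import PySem

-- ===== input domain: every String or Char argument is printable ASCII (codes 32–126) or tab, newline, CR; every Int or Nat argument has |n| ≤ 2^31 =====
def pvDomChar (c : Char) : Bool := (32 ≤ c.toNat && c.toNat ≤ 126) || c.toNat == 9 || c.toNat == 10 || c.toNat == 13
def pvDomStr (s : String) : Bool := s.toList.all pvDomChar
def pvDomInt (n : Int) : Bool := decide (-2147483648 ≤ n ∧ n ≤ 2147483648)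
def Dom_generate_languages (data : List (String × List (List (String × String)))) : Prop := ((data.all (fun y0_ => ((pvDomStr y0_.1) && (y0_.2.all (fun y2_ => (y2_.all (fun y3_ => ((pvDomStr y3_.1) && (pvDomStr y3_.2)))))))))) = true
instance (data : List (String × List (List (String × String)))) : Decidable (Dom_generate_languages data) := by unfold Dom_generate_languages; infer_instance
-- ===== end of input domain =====

-- B escapes each character with a direct if-chain instead of nine whole-string .replace
-- passes and emits the section in one forward pass into a single string accumulator
-- (a first-item flag choosing the separator) instead of list-collect-and-join (alternative).

-- ===== PORT A =====
-- the `replacements` dict of escape_latex, as (char, replacement) pairs in insertion order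
def pvRepl : List (Char × List Char) :=
  [('&', "\\&".toList), ('%', "\\%".toList), ('$', "\\$".toList), ('#', "\\#".toList),
   ('_', "\\_".toList), ('{', "\\{".toList), ('}', "\\}".toList),
   ('~', "\\textasciitilde{}".toList), ('^', "\\^{}".toList)]

-- `for char, replacement in replacements.items(): text = text.replace(char, replacement)`
def escape_latex (text : List Char) : List Char :=
  pvRepl.foldl (fun t p => PySem.Chars.replace t [p.1] p.2) text

def generate_languages (data : List (String × List (List (String × String)))) : String :=
  let languages := (PySem.Dict.mk data).getD "languages" []
  if languages = [] then "" else
    let lines : List (List Char) :=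
      ["%".toList, "\\section{Languages}".toList, "\\explanationdetail{".toList]
    let lang_items : List (List Char) := languages.foldl (fun acc lang =>
      let name := escape_latex ((PySem.Dict.mk lang).getD "language" "").toList
      let fluency := escape_latex ((PySem.Dict.mk lang).getD "fluency" "").toList
      acc ++ ["    \\coloredbullet\\ %\n     \\textbf{".toList ++ name ++ "} - ".toList ++ fluency]) []
    let lines := lines ++ [PySem.Chars.join "\n     \\hspace{2cm}\n".toList lang_items] ++ ["     }".toList]
    String.ofList (PySem.Chars.join "\n".toList lines)

-- ===== PORT B =====
-- `_esc_char`: one character's escape by a direct if-chain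
def escChar (c : Char) : List Char :=
  if c = '~' then "\\textasciitilde{}".toList
  else if c = '^' then "\\^{}".toList
  else if c ∈ "&%$#_{}".toList then ['\\', c]
  else [c]

def generate_languages_alt (data : List (String × List (List (String × String)))) : String :=
  let languages := (PySem.Dict.mk data).getD "languages" []
  if languages = [] then "" else
    -- the `for lang in languages:` loop carrying (first, out)
    let st := languages.foldl (fun (st : Bool × List Char) lang =>
      let out := if st.1 then st.2 else st.2 ++ "\n     \\hspace{2cm}\n".toList
      let out := out ++ "    \\coloredbullet\\ %\n     \\textbf{".toList
      let out := ((PySem.Dict.mk lang).getD "language" "").toList.foldl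
        (fun o c => o ++ escChar c) out
      let out := out ++ "} - ".toList
      let out := ((PySem.Dict.mk lang).getD "fluency" "").toList.foldl
        (fun o c => o ++ escChar c) out
      (false, out))
      (true, "%\n\\section{Languages}\n\\explanationdetail{\n".toList)
    String.ofList (st.2 ++ "\n     }".toList)

-- ===== PRECONDITION & SPEC =====
-- Pre_ only demands that the association lists really encode Python dicts, i.e. have no
-- duplicate keys (a Python dict cannot contain a key twice); it excludes nothing A's caller
-- could ever pass.
def Pre_generate_languages (data : List (String × List (List (String × String)))) : Prop :=
  (data.map (·.1)).Nodup ∧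
    ∀ lang ∈ (PySem.Dict.mk data).getD "languages" [], (lang.map (·.1)).Nodup
instance (data : List (String × List (List (String × String)))) : Decidable (Pre_generate_languages data) := by unfold Pre_generate_languages; infer_instance

def pvWitness_generate_languages : (List (String × List (List (String × String)))) :=
  [("languages", [[("language", "English_&_Scots"), ("fluency", "C1 ~100%")], [("language", "Italian")]])]

def Spec_generate_languages (data : List (String × List (List (String × String)))) (out : String) : Prop := out = generate_languages_alt data
instance (data : List (String × List (List (String × String)))) (out : String) : Decidable (Spec_generate_languages data out) := by unfold Spec_generate_languages; infer_instance

-- ===== CLAIM (what is proved, stated in full; the proofs are below) =====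
def Claim_equal_generate_languages : Prop := ∀ (data : List (String × List (List (String × String)))), Dom_generate_languages data → Pre_generate_languages data → Spec_generate_languages data (generate_languages data)

-- ===== LEMMAS AND PROOFS =====

-- str.replace with a single-character `old` is a per-character flatMap
theorem pv_go_single (a : Char) (rep : List Char) :
    ∀ (l acc : List Char), PySem.Chars.replace.go [a] rep l.length l acc
      = acc.reverse ++ l.flatMap (fun c => if c = a then rep else [c]) := by
  intro l
  induction l with
  | nil => intro acc; simp [PySem.Chars.replace.go]
  | cons c t ih =>
    intro acc
    rw [PySem.Chars.replace.go.eq_def]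
    simp only [List.length_cons]
    by_cases h : c = a
    · subst h
      simp [List.isPrefixOf, ih]
    · simp [List.isPrefixOf, h, ih, Ne.symm h]

theorem pv_replace_single (cs : List Char) (a : Char) (rep : List Char) :
    PySem.Chars.replace cs [a] rep = cs.flatMap (fun c => if c = a then rep else [c]) := by
  simpa using pv_go_single a rep cs []

-- escape_latex distributes over ++ (each replace pass is a flatMap)
theorem pv_esc_append (xs ys : List Char) :
    escape_latex (xs ++ ys) = escape_latex xs ++ escape_latex ys := by
  simp [escape_latex, pvRepl, List.foldl, pv_replace_single, List.flatMap_append]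

-- on a single character the nine-pass escape equals B's if-chain
theorem pv_esc_char (c : Char) : escape_latex [c] = escChar c := by
  by_cases h1 : c = '&'; · subst h1; decide
  by_cases h2 : c = '%'; · subst h2; decide
  by_cases h3 : c = '$'; · subst h3; decide
  by_cases h4 : c = '#'; · subst h4; decide
  by_cases h5 : c = '_'; · subst h5; decide
  by_cases h6 : c = '{'; · subst h6; decide
  by_cases h7 : c = '}'; · subst h7; decide
  by_cases h8 : c = '~'; · subst h8; decide
  by_cases h9 : c = '^'; · subst h9; decide
  simp [escape_latex, pvRepl, List.foldl, pv_replace_single, escChar,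
        h1, h2, h3, h4, h5, h6, h7, h8, h9]

-- the nine-pass escape is the per-character escape
theorem pv_esc_eq (cs : List Char) : escape_latex cs = cs.flatMap escChar := by
  induction cs with
  | nil => decide
  | cons c t ih =>
    have : escape_latex (c :: t) = escape_latex [c] ++ escape_latex t := by
      simpa using pv_esc_append [c] t
    simp [this, pv_esc_char, ih]

-- one item's text
def pvItem (lang : List (String × String)) : List Char :=
  "    \\coloredbullet\\ %\n     \\textbf{".toList
    ++ ((PySem.Dict.mk lang).getD "language" "").toList.flatMap escChar
    ++ "} - ".toList
    ++ ((PySem.Dict.mk lang).getD "fluency" "").toList.flatMap escChar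

def pvSep : List Char := "\n     \\hspace{2cm}\n".toList

-- join over a nonempty list as head ++ flatMap of separated tails
theorem pv_join_cons (sep : List Char) (x : List Char) :
    ∀ t : List (List Char), PySem.Chars.join sep (x :: t) = x ++ t.flatMap (fun y => sep ++ y) := by
  intro t
  induction t generalizing x with
  | nil => simp [PySem.Chars.join_singleton]
  | cons y ys ih => simp [PySem.Chars.join_cons_cons, ih, List.append_assoc]

-- B's outer loop after the first item
theorem pv_fold_false (ls : List (List (String × String))) : ∀ o : List Char,
    (ls.foldl (fun (st : Bool × List Char) lang =>
      (false,
        ((PySem.Dict.mk lang).getD "fluency" "").toList.foldl (fun o c => o ++ escChar c)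
          (((PySem.Dict.mk lang).getD "language" "").toList.foldl (fun o c => o ++ escChar c)
            ((if st.1 then st.2 else st.2 ++ "\n     \\hspace{2cm}\n".toList)
              ++ "    \\coloredbullet\\ %\n     \\textbf{".toList)
           ++ "} - ".toList))) (false, o)).2
    = o ++ ls.flatMap (fun l => pvSep ++ pvItem l) := by
  induction ls with
  | nil => simp
  | cons l t ih =>
    intro o
    simp only [List.foldl_cons, List.flatMap_cons]
    rw [ih]
    simp [pvItem, pvSep, List.append_assoc, List.flatMap_def]

-- ===== VERDICT (by name: the statement is the Claim_ definition above) =====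
theorem generate_languages_spec : Claim_equal_generate_languages := by
  intro data _ _
  unfold Spec_generate_languages generate_languages generate_languages_alt
  cases h : (PySem.Dict.mk data).getD "languages" [] with
  | nil => simp
  | cons l t =>
    simp only [reduceCtorEq, ite_false, if_true, List.foldl_cons, List.cons_append, List.nil_append]
    rw [PySem.List.foldl_append_singleton_eq_map]
    simp only [List.singleton_append]
    rw [pv_join_cons "\n".toList, pv_join_cons "\n     \\hspace{2cm}\n".toList]
    rw [pv_fold_false t]
    simp [pv_esc_eq, pvItem, pvSep, List.append_assoc, List.flatMap_def,
      List.map_map, Function.comp_def]
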